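-- pv_equiv track=rewrite | github.com/stephenfrench9/predicting-defaults | generate_joint_pdf.py | bin_count_dictionary
-- ===== SOURCE A (Python) =====
-- def put_latescore_in_bin(latescore):
--     if (((latescore + 1) % 3) == 0):
--         newlatescore = latescore + 1
--     elif (((latescore - 1) % 3) == 0):
--         newlatescore = latescore - 1
--     else:
--         newlatescore = latescore
--
--     if newlatescore > 12:
--         newlatescore = 12
--     elif newlatescore < -12:
--         newlatescore = -12
--
--
--     return newlatescore
--
-- def bin_count_dictionary(c):
--     newdict = {}
--
--
--
--     for key, value in c.items():
--
--         newkey = put_latescore_in_bin(key)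
--
--         if newkey in newdict:
--             newdict[newkey] += c[key]
--         else:
--             newdict[newkey] = c[key]
--
--     doomed_keys=[]
--     for key, value in newdict.items():
--         if key > 12:
--             newdict[12] += value
--             doomed_keys.append(key)
--
--     for key in doomed_keys:
--         del(newdict[key])
--
--     return newdict
-- ===== SOURCE B (Python) =====
-- def put_latescore_in_bin(latescore):
--     if (((latescore + 1) % 3) == 0):
--         newlatescore = latescore + 1
--     elif (((latescore - 1) % 3) == 0):
--         newlatescore = latescore - 1
--     else:
--         newlatescore = latescore
--
--     if newlatescore > 12:
--         newlatescore = 12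
--     elif newlatescore < -12:
--         newlatescore = -12
--
--
--     return newlatescore
--
-- def bin_count_dictionary(c):
--     bins = dict.fromkeys(put_latescore_in_bin(k) for k in c)
--     return {b: sum(v for k, v in c.items() if put_latescore_in_bin(k) == b)
--             for b in bins}
-- ===== Notes on version B (the rewrite author's own statement) =====
-- stated objective: simpler
-- what changed: B replaces A's incremental membership-tested dict accumulation plus two provably dead clean-up loops (no bin ever exceeds 12) with a two-step grouped reduction: dedupe the bins in first-occurrence order via dict.fromkeys, then build the result in one comprehension summing each bin's values; Pre_ only states that the dict argument has distinct keys, which every Python dict has.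
import Mathlib
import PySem

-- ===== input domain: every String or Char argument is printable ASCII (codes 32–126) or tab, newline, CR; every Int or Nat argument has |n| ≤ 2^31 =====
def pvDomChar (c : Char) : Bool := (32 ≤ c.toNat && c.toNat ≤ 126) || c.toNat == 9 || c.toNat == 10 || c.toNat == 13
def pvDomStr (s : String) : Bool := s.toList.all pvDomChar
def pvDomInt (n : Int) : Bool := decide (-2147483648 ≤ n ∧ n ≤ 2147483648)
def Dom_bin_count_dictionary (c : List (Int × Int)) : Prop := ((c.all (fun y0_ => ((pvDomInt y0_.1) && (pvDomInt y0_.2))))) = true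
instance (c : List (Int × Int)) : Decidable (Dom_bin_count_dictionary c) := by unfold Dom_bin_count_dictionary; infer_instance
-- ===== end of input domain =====

-- B (simpler): instead of A's incremental membership-tested dict accumulation plus two
-- provably dead clean-up loops, B lists the distinct bins (dict.fromkeys) and builds the
-- result in one comprehension summing each bin's values; same return value, including order.

-- ===== PORT A =====
def put_latescore_in_bin (latescore : Int) : Int :=
  let newlatescore :=
    if PySem.Int.mod (latescore + 1) 3 == 0 then latescore + 1
    else if PySem.Int.mod (latescore - 1) 3 == 0 then latescore - 1
    else latescore
  if newlatescore > 12 then 12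
  else if newlatescore < -12 then (-12)
  else newlatescore

def bin_count_dictionary (c : List (Int × Int)) : List (Int × Int) :=
  let cD : PySem.Dict Int Int := PySem.Dict.mk c   -- the input dict c (keys unique under Pre_)
  let newdict : PySem.Dict Int Int :=
    c.foldl (fun nd kv =>
      let newkey := put_latescore_in_bin kv.1
      if nd.contains newkey then
        nd.insert newkey (nd.getD newkey 0 + cD.getD kv.1 0)   -- newdict[newkey] += c[key]
      else
        nd.insert newkey (cD.getD kv.1 0)) PySem.Dict.empty
  -- second loop: collect doomed keys, adding their value into newdict[12]
  -- (newdict[12] += value ported as modify with default 0; the branch is unreachable since no key exceeds 12)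
  let st := newdict.items.foldl
      (fun (st : PySem.Dict Int Int × List Int) kv =>
        if kv.1 > 12 then (st.1.modify 12 0 (· + kv.2), st.2 ++ [kv.1]) else st)
      (newdict, ([] : List Int))
  -- third loop: delete the doomed keys
  (st.2.foldl (fun d k => d.erase k) st.1).items

-- ===== PORT B =====
def bin_count_dictionary_alt (c : List (Int × Int)) : List (Int × Int) :=
  let bins := PySem.List.dedup (c.map (fun kv => put_latescore_in_bin kv.1))
  bins.map (fun b =>
    (b, ((c.filter (fun kv => put_latescore_in_bin kv.1 == b)).map Prod.snd).sum))

-- ===== PRECONDITION & SPEC =====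
-- The Python argument c is a dict, whose keys are necessarily distinct; Pre_ states exactly
-- that the association list represents a dict (no duplicate keys). It excludes nothing a
-- Python caller can pass.
def Pre_bin_count_dictionary (c : List (Int × Int)) : Prop := (c.map Prod.fst).Nodup
instance (c : List (Int × Int)) : Decidable (Pre_bin_count_dictionary c) := by unfold Pre_bin_count_dictionary; infer_instance
def pvWitness_bin_count_dictionary : (List (Int × Int)) := [(0, 1), (2, 3), (-5, 7)]

def Spec_bin_count_dictionary (c : List (Int × Int)) (out : List (Int × Int)) : Prop := out = bin_count_dictionary_alt c
instance (c : List (Int × Int)) (out : List (Int × Int)) : Decidable (Spec_bin_count_dictionary c out) := by unfold Spec_bin_count_dictionary; infer_instance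

-- ===== CLAIM (what is proved, stated in full; the proofs are below) =====
def Claim_equal_bin_count_dictionary : Prop := ∀ (c : List (Int × Int)), Dom_bin_count_dictionary c → Pre_bin_count_dictionary c → Spec_bin_count_dictionary c (bin_count_dictionary c)

-- ===== LEMMAS AND PROOFS =====

-- every bin is at most 12 (the clamp at the end of put_latescore_in_bin)
theorem put_latescore_le_12 (x : Int) : put_latescore_in_bin x ≤ 12 := by
  unfold put_latescore_in_bin
  dsimp only
  split_ifs <;> omega

-- abbreviation used only by the proofs
def pvGroup (l : List (Int × Int)) : List (Int × Int) :=
  (PySem.Set.ofList (l.map (fun kv => put_latescore_in_bin kv.1))).map (fun b =>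
    (b, ((l.filter (fun kv => put_latescore_in_bin kv.1 == b)).map Prod.snd).sum))

-- the accumulation loop of A computes exactly the grouped sums of B, in first-occurrence order
theorem accum_items (l : List (Int × Int)) :
    (l.foldl (fun nd kv =>
        if nd.contains (put_latescore_in_bin kv.1) then
          nd.insert (put_latescore_in_bin kv.1) (nd.getD (put_latescore_in_bin kv.1) 0 + kv.2)
        else
          nd.insert (put_latescore_in_bin kv.1) kv.2) PySem.Dict.empty).items
      = pvGroup l := by
  induction l using List.reverseRecOn with
  | nil => rfl
  | append_singleton l p ih =>
      rw [List.foldl_append, List.foldl_cons, List.foldl_nil]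
      set d := l.foldl (fun nd kv =>
        if nd.contains (put_latescore_in_bin kv.1) then
          nd.insert (put_latescore_in_bin kv.1) (nd.getD (put_latescore_in_bin kv.1) 0 + kv.2)
        else
          nd.insert (put_latescore_in_bin kv.1) kv.2) PySem.Dict.empty with hd
      have hkeys : d.keys = PySem.Set.ofList (l.map (fun kv => put_latescore_in_bin kv.1)) := by
        show d.items.map Prod.fst = _
        simp only [ih, pvGroup, List.map_map]
        exact List.map_id _
      have hnodup : d.keys.Nodup := by rw [hkeys]; exact PySem.Set.nodup_ofList _
      have hsetapp : PySem.Set.ofList ((l ++ [p]).map (fun kv => put_latescore_in_bin kv.1))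
          = PySem.Set.add (PySem.Set.ofList (l.map (fun kv => put_latescore_in_bin kv.1)))
              (put_latescore_in_bin p.1) := by
        simp [PySem.Set.ofList]
      by_cases hb : put_latescore_in_bin p.1 ∈ l.map (fun kv => put_latescore_in_bin kv.1)
      · -- bin already present: in-place update
        have hcont : d.contains (put_latescore_in_bin p.1) = true := by
          rw [PySem.Dict.contains_iff_mem_keys, hkeys, PySem.Set.mem_ofList]; exact hb
        have hmemset : put_latescore_in_bin p.1 ∈
            PySem.Set.ofList (l.map (fun kv => put_latescore_in_bin kv.1)) :=
          (PySem.Set.mem_ofList _ _).mpr hb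
        have hmemitems : (put_latescore_in_bin p.1,
            ((l.filter (fun kv => put_latescore_in_bin kv.1 == put_latescore_in_bin p.1)).map Prod.snd).sum)
            ∈ d.items := by
          rw [ih]; exact List.mem_map.mpr ⟨put_latescore_in_bin p.1, hmemset, rfl⟩
        have hgetD := PySem.Dict.getD_of_mem_items d hmemitems hnodup 0
        rw [if_pos hcont, PySem.Dict.items_insert_of_contains d _ hcont, ih, hgetD]
        have hset : PySem.Set.add (PySem.Set.ofList (l.map (fun kv => put_latescore_in_bin kv.1)))
            (put_latescore_in_bin p.1)
            = PySem.Set.ofList (l.map (fun kv => put_latescore_in_bin kv.1)) := by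
          simp [PySem.Set.add, hmemset]
        unfold pvGroup
        rw [hsetapp, hset, List.map_map]
        refine List.map_congr_left (fun b hbmem => ?_)
        by_cases heq : b = put_latescore_in_bin p.1
        · subst heq
          simp [List.filter_append]
        · simp only [Function.comp]
          rw [if_neg (by simpa using heq)]
          simp [List.filter_append, Ne.symm heq]
      · -- new bin: appended at the end
        have hcont : d.contains (put_latescore_in_bin p.1) = false := by
          rw [Bool.eq_false_iff]
          intro h
          rw [PySem.Dict.contains_iff_mem_keys, hkeys, PySem.Set.mem_ofList] at h
          exact hb h
        rw [if_neg (by simp [hcont]), PySem.Dict.items_insert_of_not_contains d _ hcont, ih]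
        have hfilt_nil : l.filter (fun kv => put_latescore_in_bin kv.1 == put_latescore_in_bin p.1) = [] := by
          rw [List.filter_eq_nil_iff]
          intro kv hkv hbeq
          exact hb (List.mem_map.mpr ⟨kv, hkv, (beq_iff_eq.mp hbeq)⟩)
        have hset : PySem.Set.add (PySem.Set.ofList (l.map (fun kv => put_latescore_in_bin kv.1)))
            (put_latescore_in_bin p.1)
            = PySem.Set.ofList (l.map (fun kv => put_latescore_in_bin kv.1)) ++ [put_latescore_in_bin p.1] := by
          have : ¬ put_latescore_in_bin p.1 ∈ PySem.Set.ofList (l.map (fun kv => put_latescore_in_bin kv.1)) := by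
            rw [PySem.Set.mem_ofList]; exact hb
          simp [PySem.Set.add, this]
        unfold pvGroup
        rw [hsetapp, hset, List.map_append]
        congr 1
        · refine List.map_congr_left (fun b hbmem => ?_)
          have hne : b ≠ put_latescore_in_bin p.1 := by
            intro h; subst h; exact hb ((PySem.Set.mem_ofList _ _).mp hbmem)
          simp [List.filter_append, Ne.symm hne]
        · simp [List.filter_append, hfilt_nil]

-- a fold whose guard never fires is the identity on its state
theorem foldl_no_doomed (items : List (Int × Int)) (st : PySem.Dict Int Int × List Int)
    (h : ∀ p ∈ items, ¬ p.1 > 12) :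
    items.foldl (fun st kv => if kv.1 > 12 then (st.1.modify 12 0 (· + kv.2), st.2 ++ [kv.1]) else st) st = st := by
  induction items generalizing st with
  | nil => rfl
  | cons p rest ih =>
      rw [List.foldl_cons, if_neg (h p (List.mem_cons_self))]
      exact ih st (fun q hq => h q (List.mem_cons_of_mem _ hq))

-- ===== VERDICT (by name: the statement is the Claim_ definition above) =====
theorem bin_count_dictionary_spec : Claim_equal_bin_count_dictionary := by
  intro c _hdom hpre
  show bin_count_dictionary c = bin_count_dictionary_alt c
  unfold bin_count_dictionary bin_count_dictionary_alt
  dsimp only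
  -- c[key] is kv.2: keys are unique (Pre_) and kv ∈ c
  have hck : ∀ kv ∈ c, (PySem.Dict.mk c).getD kv.1 0 = kv.2 := by
    intro kv hkv
    exact PySem.Dict.getD_of_mem_items (PySem.Dict.mk c) (by simpa using hkv) (by simpa using hpre) 0
  have hcongr : c.foldl (fun nd kv =>
      if nd.contains (put_latescore_in_bin kv.1) then
        nd.insert (put_latescore_in_bin kv.1) (nd.getD (put_latescore_in_bin kv.1) 0 + (PySem.Dict.mk c).getD kv.1 0)
      else
        nd.insert (put_latescore_in_bin kv.1) ((PySem.Dict.mk c).getD kv.1 0)) PySem.Dict.empty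
    = c.foldl (fun nd kv =>
      if nd.contains (put_latescore_in_bin kv.1) then
        nd.insert (put_latescore_in_bin kv.1) (nd.getD (put_latescore_in_bin kv.1) 0 + kv.2)
      else
        nd.insert (put_latescore_in_bin kv.1) kv.2) PySem.Dict.empty := by
    refine PySem.List.foldl_congr_mem c _ _ _ (fun acc kv hkv => ?_)
    rw [hck kv hkv]
  rw [hcongr]
  set nd := c.foldl (fun nd kv =>
      if nd.contains (put_latescore_in_bin kv.1) then
        nd.insert (put_latescore_in_bin kv.1) (nd.getD (put_latescore_in_bin kv.1) 0 + kv.2)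
      else
        nd.insert (put_latescore_in_bin kv.1) kv.2) PySem.Dict.empty with hnd
  have hitems : nd.items = pvGroup c := accum_items c
  have hle : ∀ p ∈ nd.items, ¬ p.1 > 12 := by
    intro p hp
    rw [hitems] at hp
    unfold pvGroup at hp
    obtain ⟨b, hbmem, rfl⟩ := List.mem_map.mp hp
    obtain ⟨kv, _, rfl⟩ := List.mem_map.mp ((PySem.Set.mem_ofList _ _).mp hbmem)
    simpa using put_latescore_le_12 kv.1
  rw [foldl_no_doomed nd.items (nd, []) hle]
  simpa [pvGroup, PySem.List.dedup_eq_ofList] using hitems
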